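-- pv_equiv track=rewrite | github.com/sensors-inl/Nervous-Analytics | nervous_analytics/preprocessing/fall_smoother.py | _find_critical_minima
-- ===== SOURCE A (Python) =====
-- def _find_critical_minima(data):
--     maxi_left_list = []
--     maxi_right_list = []
--     mini_list = [
--         idx
--         for idx in range(1, len(data) - 1)
--         if data[idx] < data[idx + 1] and data[idx] < data[idx - 1] and data[idx] != 0
--     ]
--
--     # Find left and right maxima
--     for mini in mini_list:
--         maxi_left = mini
--         maxi_right = mini
--
--         while data[maxi_left] < data[maxi_left - 1]:
--             maxi_left -= 1
--             if maxi_left == 0: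
--                 break
--
--         while data[maxi_right] < data[maxi_right + 1]:
--             maxi_right += 1
--             if maxi_right == len(data) - 1:
--                 break
--
--         maxi_left_list.append(maxi_left)
--         maxi_right_list.append(maxi_right)
--
--     return zip(maxi_left_list, mini_list, maxi_right_list)
-- ===== SOURCE B (Python) =====
-- def _find_critical_minima(data):
--     # Two linear DP passes over monotone runs: L[i]/R[i] are the indices reached by
--     # climbing left/right from i along a strict descent/ascent; O(1) per minimum.
--     n = len(data)
--     L = []
--     for i in range(n):
--         L.append(L[-1] if i > 0 and data[i] < data[i - 1] else i)
--     R = []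
--     for i in range(n - 1, -1, -1):
--         R.append(R[-1] if i + 1 < n and data[i] < data[i + 1] else i)
--     R.reverse()
--     mins = [i for i in range(1, n - 1)
--             if data[i] < data[i - 1] and data[i] < data[i + 1] and data[i] != 0]
--     return zip([L[i] for i in mins], mins, [R[i] for i in mins])
-- ===== Notes on version B (the rewrite author's own statement) =====
-- stated objective: alternative
-- what changed: Replaced the per-minimum while-loop climbs with two linear DP passes (forward L-array of left climb targets over strict descents, backward R-array over strict ascents) and O(1) lookups per minimum.
import Mathlib
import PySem

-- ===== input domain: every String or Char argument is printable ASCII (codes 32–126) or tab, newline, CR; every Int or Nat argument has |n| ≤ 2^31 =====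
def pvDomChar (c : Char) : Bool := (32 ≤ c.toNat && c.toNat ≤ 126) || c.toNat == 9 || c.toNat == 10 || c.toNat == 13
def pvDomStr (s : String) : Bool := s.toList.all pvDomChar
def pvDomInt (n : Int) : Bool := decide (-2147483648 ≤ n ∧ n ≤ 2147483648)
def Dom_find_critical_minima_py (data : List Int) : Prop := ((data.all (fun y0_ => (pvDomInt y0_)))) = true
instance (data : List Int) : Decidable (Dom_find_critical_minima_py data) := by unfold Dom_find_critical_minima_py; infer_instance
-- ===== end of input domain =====

-- B replaces A's per-minimum while-loop climbs by two linear DP passes over monotone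
-- runs (alternative algorithm, same results).
-- Every Python index in both programs is in range on every input (the loop guards
-- break before leaving the list), so List.getD is an exact port of data[i].

-- ===== PORT A =====
def pvGet (data : List Int) (i : Nat) : Int := data.getD i 0

-- A's "while data[j] < data[j-1]: j -= 1; if j == 0: break"
def climbLeftA (data : List Int) : Nat → Nat
  | 0 => 0
  | k+1 =>
    if pvGet data (k+1) < pvGet data k then
      (if k = 0 then 0 else climbLeftA data k)
    else k+1

-- A's "while data[j] < data[j+1]: j += 1; if j == len(data)-1: break" (fuel-bounded)
def climbRightA (data : List Int) : Nat → Nat → Nat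
  | 0, j => j
  | f+1, j =>
    if pvGet data j < pvGet data (j+1) then
      (if j + 1 = data.length - 1 then j+1 else climbRightA data f (j+1))
    else j

def find_critical_minima_py (data : List Int) : List (Int × Int × Int) :=
  let n := data.length
  let mini_list := (List.range' 1 (n - 2)).filter
    (fun idx => decide (pvGet data idx < pvGet data (idx+1) ∧
                        pvGet data idx < pvGet data (idx-1) ∧ pvGet data idx ≠ 0))
  let lists := mini_list.foldl
    (fun (acc : List Nat × List Nat) mini =>
      (acc.1 ++ [climbLeftA data mini], acc.2 ++ [climbRightA data n mini]))
    ([], [])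
  List.zip (lists.1.map (fun x => Int.ofNat x))
    (List.zip (mini_list.map (fun x => Int.ofNat x)) (lists.2.map (fun x => Int.ofNat x)))

-- ===== PORT B =====
-- the growing Python lists are kept reversed (cons = append); Python's final
-- R.reverse() therefore disappears for R and appears as .reverse for L
def find_critical_minima_py_alt (data : List Int) : List (Int × Int × Int) :=
  let n := data.length
  let L := ((List.range n).foldl
    (fun acc i => (if 0 < i ∧ pvGet data i < pvGet data (i-1) then acc.headD 0 else i) :: acc)
    []).reverse
  let R := (List.range n).reverse.foldl
    (fun acc i => (if i + 1 < n ∧ pvGet data i < pvGet data (i+1) then acc.headD 0 else i) :: acc)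
    []
  let mins := (List.range' 1 (n - 2)).filter
    (fun i => decide (pvGet data i < pvGet data (i-1) ∧
                      pvGet data i < pvGet data (i+1) ∧ pvGet data i ≠ 0))
  List.zip (mins.map (fun i => Int.ofNat (L.getD i 0)))
    (List.zip (mins.map (fun i => Int.ofNat i)) (mins.map (fun i => Int.ofNat (R.getD i 0))))

-- ===== PRECONDITION & SPEC =====
def Spec_find_critical_minima_py (data : List Int) (out : List (Int × Int × Int)) : Prop := out = find_critical_minima_py_alt data
instance (data : List Int) (out : List (Int × Int × Int)) : Decidable (Spec_find_critical_minima_py data out) := by unfold Spec_find_critical_minima_py; infer_instance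

-- ===== CLAIM (what is proved, stated in full; the proofs are below) =====
def Claim_equal_find_critical_minima_py : Prop := ∀ (data : List Int), Dom_find_critical_minima_py data → Spec_find_critical_minima_py data (find_critical_minima_py data)

-- ===== LEMMAS AND PROOFS =====

-- characterization of the right climb, by recursion on length - j
def rspec (data : List Int) (j : Nat) : Nat :=
  if h : j + 1 < data.length then
    (if pvGet data j < pvGet data (j+1) then rspec data (j+1) else j)
  else j
termination_by data.length - j
decreasing_by omega

theorem climbLeftA_succ (data : List Int) (k : Nat) :
    climbLeftA data (k+1) =
      if pvGet data (k+1) < pvGet data k then climbLeftA data k else k+1 := by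
  cases k with
  | zero => simp [climbLeftA]
  | succ m => rfl

theorem buildL_eq (data : List Int) (m : Nat) :
    ((List.range m).foldl
      (fun acc i => (if 0 < i ∧ pvGet data i < pvGet data (i-1) then acc.headD 0 else i) :: acc)
      []) = ((List.range m).map (climbLeftA data)).reverse := by
  induction m with
  | zero => simp
  | succ k ih =>
    rw [List.range_succ, List.foldl_append, ih]
    simp only [List.foldl_cons, List.foldl_nil, List.map_append, List.reverse_append,
      List.map_cons, List.map_nil]
    congr 1
    cases k with
    | zero => simp [climbLeftA]
    | succ j =>
      rw [climbLeftA_succ]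
      have hhead : ((List.range (j+1)).map (climbLeftA data)).reverse.headD 0
          = climbLeftA data j := by
        rw [List.range_succ]
        simp
      simp only [Nat.add_sub_cancel, hhead]
      by_cases h : pvGet data (j+1) < pvGet data j <;> simp [h]

theorem buildR_eq (data : List Int) (k : Nat) (hk : k ≤ data.length) :
    ((List.range' (data.length - k) k).reverse.foldl
      (fun acc i => (if i + 1 < data.length ∧ pvGet data i < pvGet data (i+1) then acc.headD 0 else i) :: acc)
      []) = (List.range' (data.length - k) k).map (rspec data) := by
  induction k with
  | zero => simp
  | succ k ih =>
    have h1 : data.length - (k+1) + 1 = data.length - k := by omega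
    have hcons : List.range' (data.length - (k+1)) (k+1)
        = (data.length - (k+1)) :: List.range' (data.length - k) k := by
      rw [List.range'_succ, h1]
    rw [hcons]
    simp only [List.reverse_cons, List.foldl_append, List.foldl_cons, List.foldl_nil,
      List.map_cons]
    rw [ih (by omega)]
    congr 1
    cases k with
    | zero =>
      rw [rspec.eq_def, dif_neg (by omega)]
      rw [if_neg (by rintro ⟨hc, -⟩; omega)]
    | succ m =>
      have hlt : data.length - (m+1+1) + 1 = data.length - (m+1) := by omega
      have hacc : ((List.range' (data.length - (m+1)) (m+1)).map (rspec data)).headD 0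
          = rspec data (data.length - (m+1)) := by
        rw [List.range'_succ]; simp
      rw [rspec.eq_def, dif_pos (by omega), hacc]
      split_ifs with h1 h2 h3
      · rw [← hlt]
      · exact absurd h1.2 h2
      · exact absurd ⟨by omega, h3⟩ h1
      · rfl

theorem climbRightA_eq (data : List Int) (f j : Nat)
    (hj : j < data.length - 1) (hf : data.length - 1 - j ≤ f) :
    climbRightA data f j = rspec data j := by
  induction f generalizing j with
  | zero => omega
  | succ f ih =>
    have hj1 : j + 1 < data.length := by omega
    rw [climbRightA, rspec.eq_def, dif_pos hj1]
    by_cases h : pvGet data j < pvGet data (j+1)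
    · simp only [h, if_true]
      by_cases he : j + 1 = data.length - 1
      · rw [if_pos he, rspec.eq_def, dif_neg (by omega)]
      · rw [if_neg he, ih (j+1) (by omega) (by omega)]
    · simp [h]

theorem zip3_map {α : Type} (l : List α) (f g h : α → Int) :
    List.zip (l.map f) (List.zip (l.map g) (l.map h))
      = l.map (fun x => (f x, g x, h x)) := by
  induction l with
  | nil => simp
  | cons a t ih => simp [ih]

theorem foldl_pairs {α β : Type} (l : List α) (acc : List β × List β) (f h : α → β) :
    l.foldl (fun acc m => (acc.1 ++ [f m], acc.2 ++ [h m])) acc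
      = (acc.1 ++ l.map f, acc.2 ++ l.map h) := by
  induction l generalizing acc with
  | nil => simp
  | cons a t ih => simp [ih]

theorem map_range_getD (n : Nat) (f : Nat → Nat) (m : Nat) (hm : m < n) :
    (((List.range n).map f).getD m 0) = f m := by
  rw [List.getD_eq_getElem?_getD]
  simp [hm]

-- ===== VERDICT (by name: the statement is the Claim_ definition above) =====
theorem find_critical_minima_py_spec : Claim_equal_find_critical_minima_py := by
  intro data _
  unfold Spec_find_critical_minima_py
  simp only [find_critical_minima_py, find_critical_minima_py_alt]
  rw [foldl_pairs]
  have hfilter : (List.range' 1 (data.length - 2)).filter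
      (fun idx => decide (pvGet data idx < pvGet data (idx+1) ∧
                          pvGet data idx < pvGet data (idx-1) ∧ pvGet data idx ≠ 0))
    = (List.range' 1 (data.length - 2)).filter
      (fun i => decide (pvGet data i < pvGet data (i-1) ∧
                        pvGet data i < pvGet data (i+1) ∧ pvGet data i ≠ 0)) := by
    apply List.filter_congr
    intro x _
    simp only [decide_eq_decide]
    constructor
    · rintro ⟨a, b, c⟩; exact ⟨b, a, c⟩
    · rintro ⟨a, b, c⟩; exact ⟨b, a, c⟩
  rw [hfilter]
  set mins := (List.range' 1 (data.length - 2)).filter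
      (fun i => decide (pvGet data i < pvGet data (i-1) ∧
                        pvGet data i < pvGet data (i+1) ∧ pvGet data i ≠ 0)) with hmins
  have hLe : ((List.range data.length).foldl
      (fun acc i => (if 0 < i ∧ pvGet data i < pvGet data (i-1) then acc.headD 0 else i) :: acc)
      []).reverse = (List.range data.length).map (climbLeftA data) := by
    rw [buildL_eq]; simp
  have hRe : ((List.range data.length).reverse.foldl
      (fun acc i => (if i + 1 < data.length ∧ pvGet data i < pvGet data (i+1) then acc.headD 0 else i) :: acc)
      []) = (List.range data.length).map (rspec data) := by
    have h := buildR_eq data data.length (le_refl _)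
    rw [Nat.sub_self] at h
    rw [List.range_eq_range']
    exact h
  rw [hLe, hRe]
  simp only [List.nil_append, List.map_map]
  rw [zip3_map, zip3_map]
  apply List.map_congr_left
  intro m hm
  have hmem : m ∈ List.range' 1 (data.length - 2) := List.mem_of_mem_filter hm
  rw [List.mem_range'] at hmem
  obtain ⟨h1, h2⟩ := hmem
  have hmn : m < data.length := by omega
  simp only [Function.comp_apply]
  rw [map_range_getD _ _ _ hmn, map_range_getD _ _ _ hmn,
    climbRightA_eq data data.length m (by omega) (by omega)]
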